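-- pv_equiv track=rewrite | github.com/Smerdiakov/automate | execution_test.py | propriete_3
-- ===== SOURCE A (Python) =====
-- def propriete_3(chaine,lettre_ref):
-- 	booleen = True
-- 	booleen_b = False
-- 	for lettre in chaine :
-- 		if lettre==lettre_ref:
-- 			booleen_b = True
-- 		else:
-- 			if booleen_b:
-- 				booleen = False
-- 	return booleen
-- ===== SOURCE B (Python) =====
-- def propriete_3(chaine, lettre_ref):
--     elems = list(chaine)
--     k = sum(1 for x in elems if x == lettre_ref)
--     return all(x == lettre_ref for x in elems[len(elems) - k:])
-- ===== Notes on version B (the rewrite author's own statement) =====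
-- stated objective: alternative
-- what changed: Replaces A's stateful flag scan with a counting argument: count the occurrences k of lettre_ref, then the answer is whether the last k elements are all lettre_ref (the refs form a suffix iff they fill the last k slots).
import Mathlib
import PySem

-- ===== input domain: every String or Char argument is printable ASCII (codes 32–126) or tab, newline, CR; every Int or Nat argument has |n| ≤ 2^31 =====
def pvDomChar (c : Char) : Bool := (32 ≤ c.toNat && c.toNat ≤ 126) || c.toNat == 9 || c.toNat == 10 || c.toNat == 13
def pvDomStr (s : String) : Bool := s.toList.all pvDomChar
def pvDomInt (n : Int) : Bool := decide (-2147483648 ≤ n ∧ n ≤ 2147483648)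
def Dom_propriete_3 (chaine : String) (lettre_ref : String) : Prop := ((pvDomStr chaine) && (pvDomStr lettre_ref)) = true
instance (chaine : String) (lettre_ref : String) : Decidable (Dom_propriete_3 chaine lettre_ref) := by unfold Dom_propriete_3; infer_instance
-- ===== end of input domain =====

-- B replaces A's stateful flag scan with a counting argument: count the occurrences k of
-- lettre_ref, then answer whether the last k elements are all lettre_ref (alternative, same cost).

-- ===== PORT A =====
def propriete_3 (chaine : String) (lettre_ref : String) : Bool :=
  (chaine.toList.foldl
    (fun (s : Bool × Bool) lettre =>
      if String.ofList [lettre] == lettre_ref then (s.1, true)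
      else if s.2 then (false, s.2) else (s.1, s.2))
    (true, false)).1

-- ===== PORT B =====
def propriete_3_alt (chaine : String) (lettre_ref : String) : Bool :=
  let elems := chaine.toList
  let k := elems.foldl (fun acc x => if String.ofList [x] == lettre_ref then acc + 1 else acc) (0 : Nat)
  (elems.drop (elems.length - k)).all (fun x => String.ofList [x] == lettre_ref)

-- ===== PRECONDITION & SPEC =====
def Spec_propriete_3 (chaine : String) (lettre_ref : String) (out : Bool) : Prop := out = propriete_3_alt chaine lettre_ref
instance (chaine : String) (lettre_ref : String) (out : Bool) : Decidable (Spec_propriete_3 chaine lettre_ref out) := by unfold Spec_propriete_3; infer_instance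

-- ===== CLAIM (what is proved, stated in full; the proofs are below) =====
def Claim_equal_propriete_3 : Prop := ∀ (chaine : String) (lettre_ref : String), Dom_propriete_3 chaine lettre_ref → Spec_propriete_3 chaine lettre_ref (propriete_3 chaine lettre_ref)

-- ===== LEMMAS AND PROOFS =====

/-- Reference function: `true` iff the elements satisfying `p` form a suffix of the list. -/
def pvG (p : Char → Bool) : List Char → Bool
  | [] => true
  | c :: t => if p c then t.all p else pvG p t

/-- A's fold in terms of `pvG`: starting state `(b, bb)`. -/
theorem foldA (p : Char → Bool) (l : List Char) (b bb : Bool) :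
    (l.foldl (fun (s : Bool × Bool) c => if p c then (s.1, true)
        else if s.2 then (false, s.2) else (s.1, s.2)) (b, bb)).1
    = (b && (if bb then l.all p else pvG p l)) := by
  induction l generalizing b bb with
  | nil => cases bb <;> simp [pvG]
  | cons c t ih =>
      simp only [List.foldl_cons]
      by_cases hc : p c
      · simp [hc, ih, pvG]
      · cases bb <;> simp [hc, ih, pvG]

/-- B's counting fold is `countP`. -/
theorem foldCount (p : Char → Bool) (l : List Char) (n : Nat) :
    l.foldl (fun acc x => if p x then acc + 1 else acc) n = n + l.countP p := by
  induction l generalizing n with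
  | nil => simp
  | cons c t ih => by_cases hc : p c <;> simp [hc, ih, List.countP_cons] <;> omega

/-- Dropping all but the last `countP p l` elements and checking `all p` decides `pvG`. -/
theorem dropAll (p : Char → Bool) (l : List Char) :
    (l.drop (l.length - l.countP p)).all p = pvG p l := by
  induction l with
  | nil => rfl
  | cons c t ih =>
      by_cases hc : p c
      · simp only [pvG, hc, if_true]
        by_cases ht : t.all p
        · have hk : t.countP p = t.length := by
            rw [List.countP_eq_length]
            intro a ha; exact (List.all_eq_true.mp ht) a ha
          simp [List.countP_cons, hc, hk, ht]
        · have hk : t.countP p < t.length := by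
            rcases Nat.lt_or_ge (t.countP p) t.length with h | h
            · exact h
            · exact absurd (List.all_eq_true.mpr
                ((List.countP_eq_length).mp (Nat.le_antisymm List.countP_le_length h))) ht
          have hd : (c :: t).length - (c :: t).countP p = (t.length - t.countP p - 1) + 1 := by
            simp [List.countP_cons, hc]; omega
          rw [hd]
          simp only [List.drop_succ_cons, ht, Bool.false_eq_true]
          -- show the suffix of length countP+1 cannot be all `p`
          rcases Nat.eq_or_lt_of_le (Nat.succ_le_of_lt hk) with h1 | h1
          · -- length = countP + 1
            by_contra hall
            have hall' : (t.drop (t.length - t.countP p - 1)).all p = true := by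
              simpa using hall
            have hlen : (t.drop (t.length - t.countP p - 1)).length = t.countP p + 1 := by
              simp [List.length_drop]; omega
            have hcnt : (t.drop (t.length - t.countP p - 1)).countP p
                = (t.drop (t.length - t.countP p - 1)).length := by
              rw [List.countP_eq_length]
              intro a ha; exact (List.all_eq_true.mp hall') a ha
            have hle : (t.drop (t.length - t.countP p - 1)).countP p ≤ t.countP p :=
              (List.drop_sublist _ _).countP_le
            omega
          · -- same argument, length > countP + 1
            by_contra hall
            have hall' : (t.drop (t.length - t.countP p - 1)).all p = true := by
              simpa using hall
            have hlen : (t.drop (t.length - t.countP p - 1)).length = t.countP p + 1 := by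
              simp [List.length_drop]; omega
            have hcnt : (t.drop (t.length - t.countP p - 1)).countP p
                = (t.drop (t.length - t.countP p - 1)).length := by
              rw [List.countP_eq_length]
              intro a ha; exact (List.all_eq_true.mp hall') a ha
            have hle : (t.drop (t.length - t.countP p - 1)).countP p ≤ t.countP p :=
              (List.drop_sublist _ _).countP_le
            omega
      · have hk : (c :: t).countP p = t.countP p := by simp [List.countP_cons, hc]
        have hle : t.countP p ≤ t.length := List.countP_le_length
        have hd : (c :: t).length - (c :: t).countP p = (t.length - t.countP p) + 1 := by
          rw [hk]; simp; omega
        simp only [pvG, hc, if_false, Bool.false_eq_true]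
        rw [hd, List.drop_succ_cons, ih]

-- ===== VERDICT (by name: the statement is the Claim_ definition above) =====
theorem propriete_3_spec : Claim_equal_propriete_3 := by
  intro chaine lettre_ref _
  unfold Spec_propriete_3 propriete_3 propriete_3_alt
  simp only [foldA, foldCount, Nat.zero_add, dropAll, Bool.true_and, Bool.false_eq_true,
    if_false]
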